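-- pv_equiv track=rewrite | github.com/Tropozone/sos-as-it-echoes-in-the-cloud | skills/fallback-merge/utils.py | ending_with_punct_manual
-- ===== SOURCE A (Python) =====
-- def ending_with_punct_manual(data):
--     punct = [";", ":", "!", ".", "?"]
--     idx_last=0
--     #if not
--     #    str.endswith(data)
--     for sign in punct:
--         idx_temp=data.rfind(sign) #last occurence sign on the righ
--         idx_last=max(idx_last,idx_temp)
--
--     if idx_last==0:#case no punctuation
--         return data
--     else:
--         return data[:idx_last+1]
-- ===== SOURCE B (Python) =====
-- def ending_with_punct_manual(data):
--     idx_last = max((i for i, c in enumerate(data) if c in {";", ":", "!", ".", "?"}), default=0)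
--     if idx_last == 0:  # case no punctuation
--         return data
--     else:
--         return data[:idx_last + 1]
-- ===== Notes on version B (the rewrite author's own statement) =====
-- stated objective: idiomatic
-- what changed: Replaces the five separate rfind scans (one per punctuation mark) with a single forward pass that takes the max index of any sentence-ending character via enumerate and a set-membership test, keeping the same idx_last==0 guard.
import Mathlib
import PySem

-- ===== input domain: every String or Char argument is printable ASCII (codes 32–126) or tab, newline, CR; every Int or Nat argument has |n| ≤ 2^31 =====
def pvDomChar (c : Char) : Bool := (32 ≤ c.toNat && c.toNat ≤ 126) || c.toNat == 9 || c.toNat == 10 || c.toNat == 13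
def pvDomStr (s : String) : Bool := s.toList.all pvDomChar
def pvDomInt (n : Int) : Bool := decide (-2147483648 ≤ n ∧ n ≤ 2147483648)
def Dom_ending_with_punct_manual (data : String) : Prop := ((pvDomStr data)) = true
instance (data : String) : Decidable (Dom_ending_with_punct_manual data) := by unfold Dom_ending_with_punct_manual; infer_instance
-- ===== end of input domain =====

-- B replaces A's five whole-string rfind scans with one forward pass taking the
-- max index of any sentence-ending character (idiomatic single pass; same result).

-- ===== PORT A =====
def ending_with_punct_manual (data : String) : String :=
  let punct : List String := [";", ":", "!", ".", "?"]
  let idx_last : Int :=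
    punct.foldl (fun idx_last sign =>
      let idx_temp := PySem.Str.rfind data sign
      max idx_last idx_temp) 0
  if idx_last == 0 then data
  else PySem.Str.slice data none (some (idx_last + 1))

-- ===== PORT B =====
def ending_with_punct_manual_alt (data : String) : String :=
  let idx_last : Int :=
    (PySem.List.enumerate data.toList).foldl
      (fun acc ic => if [';', ':', '!', '.', '?'].contains ic.2 then max acc ic.1 else acc) 0
  if idx_last == 0 then data
  else PySem.Str.slice data none (some (idx_last + 1))

-- ===== PRECONDITION & SPEC =====
def Spec_ending_with_punct_manual (data : String) (out : String) : Prop := out = ending_with_punct_manual_alt data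
instance (data : String) (out : String) : Decidable (Spec_ending_with_punct_manual data out) := by unfold Spec_ending_with_punct_manual; infer_instance

-- ===== CLAIM (what is proved, stated in full; the proofs are below) =====
def Claim_equal_ending_with_punct_manual : Prop := ∀ (data : String), Dom_ending_with_punct_manual data → Spec_ending_with_punct_manual data (ending_with_punct_manual data)

-- ===== LEMMAS AND PROOFS =====

/-- Index (position) of the last character of `L` satisfying `p`, or `-1` if none. -/
def pvLi (p : Char → Bool) : List Char → Int
  | [] => -1
  | c :: t => if pvLi p t = -1 then (if p c then 0 else -1) else pvLi p t + 1

theorem pvLi_neg_one_le (p : Char → Bool) (L : List Char) : -1 ≤ pvLi p L := by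
  induction L with
  | nil => simp [pvLi]
  | cons c t ih => simp only [pvLi]; split_ifs <;> omega

theorem pvLi_append (p : Char → Bool) (X : List Char) (c : Char) :
    pvLi p (X ++ [c]) = if p c then (X.length : Int) else pvLi p X := by
  induction X with
  | nil => simp [pvLi]
  | cons x X ih =>
    have h := pvLi_neg_one_le p X
    cases hpc : p c <;>
      simp only [List.cons_append, pvLi, ih, hpc, List.length_cons, if_true, if_false,
        Bool.false_eq_true] <;>
      split_ifs <;> push_cast <;> (try contradiction) <;> omega

theorem prefix_single_drop (L : List Char) (c : Char) (i : Nat) :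
    List.isPrefixOf [c] (L.drop i) = (L[i]?.any (fun d => d == c)) := by
  rcases h : L[i]? with _ | d
  · have hlen : L.length ≤ i := by simpa [List.getElem?_eq_none_iff] using h
    simp [List.drop_eq_nil_iff.mpr hlen]
  · obtain ⟨hi, hval⟩ := List.getElem?_eq_some_iff.mp h
    rw [List.drop_eq_getElem_cons hi]
    simp only [List.isPrefixOf, hval, Option.any_some, Bool.and_true]
    exact Bool.beq_comm

theorem rfind_go_eq (L : List Char) (c : Char) (j : Nat) :
    PySem.Chars.rfind.go L [c] j = pvLi (fun d => d == c) (L.take (j + 1)) := by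
  induction j with
  | zero =>
    rw [PySem.Chars.rfind.go]
    have := prefix_single_drop L c 0
    rcases h : L[0]? with _ | d
    · simp [h] at this
      simp [this, List.take_add_one, h, pvLi]
    · simp [h] at this
      simp [this, List.take_add_one, h, pvLi]
  | succ j ih =>
    rw [PySem.Chars.rfind.go]
    have hpre := prefix_single_drop L c (j + 1)
    rcases h : L[(j + 1)]? with _ | d
    · simp [h] at hpre
      rw [hpre, List.take_add_one (i := j + 1), h]
      simp [ih]
    · obtain ⟨hi, hval⟩ := List.getElem?_eq_some_iff.mp h
      simp [h] at hpre
      rw [hpre]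
      rw [List.take_add_one (i := j + 1), h]
      simp only [Option.toList_some, pvLi_append, ih, List.length_take, beq_iff_eq]
      rw [Nat.min_eq_left (by omega : j + 1 ≤ L.length)]

theorem rfind_single_eq (L : List Char) (c : Char) :
    PySem.Chars.rfind L [c] = pvLi (fun d => d == c) L := by
  rw [PySem.Chars.rfind, rfind_go_eq]
  rw [List.take_of_length_le (by omega)]

theorem pvLi_or (p q : Char → Bool) (L : List Char) :
    pvLi (fun c => p c || q c) L = max (pvLi p L) (pvLi q L) := by
  induction L with
  | nil => simp [pvLi]
  | cons c t ih =>
    have hp := pvLi_neg_one_le p t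
    have hq := pvLi_neg_one_le q t
    simp only [pvLi, ih]
    split_ifs <;> simp_all <;> omega

theorem foldB (P : Char → Bool) (L : List Char) :
    ∀ (s acc : Int),
      (PySem.List.enumerate L s).foldl (fun a ic => if P ic.2 then max a ic.1 else a) acc
        = if pvLi P L = -1 then acc else max acc (s + pvLi P L) := by
  induction L with
  | nil => intro s acc; simp [PySem.List.enumerate_nil, pvLi]
  | cons c t ih =>
    intro s acc
    have h := pvLi_neg_one_le P t
    rw [PySem.List.enumerate_cons]
    simp only [List.foldl_cons, ih, pvLi]
    cases hc : P c <;> simp only [hc, if_true, if_false, Bool.false_eq_true] <;> split_ifs <;> (try contradiction) <;> omega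

theorem idx_eq (data : String) :
    (List.foldl (fun idx_last sign => max idx_last (PySem.Str.rfind data sign)) 0
        [";", ":", "!", ".", "?"])
    = ((PySem.List.enumerate data.toList).foldl
        (fun acc ic => if [';', ':', '!', '.', '?'].contains ic.2 then max acc ic.1 else acc) 0) := by
  have hcon : ∀ e : Char,
      ((e == ';' || e == ':') || e == '!' || e == '.' || e == '?')
        = [';', ':', '!', '.', '?'].contains e := by
    intro e
    simp only [List.contains, List.elem, Bool.or_assoc]
    cases e == ';' <;> cases e == ':' <;> cases e == '!' <;> cases e == '.' <;> cases e == '?' <;> rfl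
  have hB := foldB (fun e => [';', ':', '!', '.', '?'].contains e) data.toList 0 0
  have hm := pvLi_neg_one_le (fun e => [';', ':', '!', '.', '?'].contains e) data.toList
  simp only [List.foldl_cons, List.foldl_nil, PySem.Str.rfind_eq]
  have h1 : (";" : String).toList = [';'] := rfl
  have h2 : (":" : String).toList = [':'] := rfl
  have h3 : ("!" : String).toList = ['!'] := rfl
  have h4 : ("." : String).toList = ['.'] := rfl
  have h5 : ("?" : String).toList = ['?'] := rfl
  rw [h1, h2, h3, h4, h5]
  rw [rfind_single_eq, rfind_single_eq, rfind_single_eq, rfind_single_eq, rfind_single_eq]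
  rw [hB]
  rw [show (fun e => [';', ':', '!', '.', '?'].contains e)
        = (fun e => ((e == ';' || e == ':') || e == '!' || e == '.' || e == '?')) from
      funext fun e => (hcon e).symm] at hm ⊢
  rw [pvLi_or, pvLi_or, pvLi_or, pvLi_or] at hm ⊢
  generalize pvLi (fun d => d == ';') data.toList = a at *
  generalize pvLi (fun d => d == ':') data.toList = b at *
  generalize pvLi (fun d => d == '!') data.toList = c' at *
  generalize pvLi (fun d => d == '.') data.toList = d' at *
  generalize pvLi (fun d => d == '?') data.toList = e' at *
  split_ifs <;> omega

-- ===== VERDICT (by name: the statement is the Claim_ definition above) =====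
theorem ending_with_punct_manual_spec : Claim_equal_ending_with_punct_manual := by
  intro data _
  unfold Spec_ending_with_punct_manual
  simp only [ending_with_punct_manual, ending_with_punct_manual_alt]
  rw [idx_eq data]
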